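-- pv_equiv track=rewrite | github.com/Bram-Hub/TruthFunctionalExpansion | LogicConverter.py | inputChecker
-- ===== SOURCE A (Python) =====
-- def inputChecker(input):
--     special = "&|@\\$_%#"
--     operations = "&|$_%#"
--     nonchars = "&|@\\$_%#~()"
--     parcount = 0
--     for n in input:
--         if n == "(":
--             parcount += 1
--         elif n == ")":
--             parcount -= 1
--     if parcount != 0:
--         return False
--     for x in range(len(input)-1):
--         if input[x] in special:
--             if input[x+1] in special or input[x+1] == ")":
--                 return False
--             elif input[x] == "@" or input[x] == "\\":
--                 if input[x+1] == "(" or input[x+1] == "~":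
--                     return False
--     if input[-1] in special or input[-1] == "(" or input[-1] == "~":
--         return False
--     if input[0] in operations or input[0] == ")":
--         return False
--     x = len(input)-1
--     while x > 0:
--         if input[x] in operations:
--             if input[x-1] == "(":
--                 return False
--         x -= 1
--     x = 0
--     while x < len(input):
--         if not (input[x] in nonchars):
--             if not (input[x+1] in nonchars):
--                 return False
--         x += 1
--     x = 0
--     while x < len(input):
--         if input[x] == "@" or input[x] == "\\":
--             curVar = input[x+1]
--             back = x
--             while back >= 0:
--                 if input[back] == curVar:
--                     return False
--                 back -= 1
--             parse = x+2
--             parcount = 0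
--             while input[parse] == "~":
--                 parse += 1
--             while parse < len(input):
--                 if input[parse] == "(":
--                     parcount += 1
--                 elif input[parse] == ")":
--                     parcount += -1
--                 parse += 1
--                 if parcount == 0:
--                     break
--             while parse < len(input):
--                 if input[parse] == curVar:
--                     return False
--                 parse += 1
--         x += 1
--     return True
-- ===== SOURCE B (Python) =====
-- def inputChecker(input):
--     special = "&|@\\$_%#"
--     operations = "&|$_%#"
--     nonchars = "&|@\\$_%#~()"
--     s = input
--     n = len(s)
--     if n == 0:
--         return False
--     # one reverse sweep precomputes everything A rescans for: d accumulates the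
--     # (negated) paren balance; nxt[i] is the least j > i whose paren depth equals the
--     # depth just before index i (else n) -- exactly where A's scope scan from i stops;
--     # first[c]/last[c] are the first/last occurrence of each character.
--     nxt = {}
--     first = {}
--     last = {}
--     seen = {0: n}
--     d = 0
--     for i in range(n - 1, -1, -1):
--         c = s[i]
--         d -= (c == "(") - (c == ")")
--         nxt[i] = seen.get(d, n)
--         seen[d] = i
--         first[c] = i
--         if c not in last:
--             last[c] = i
--     if d != 0:
--         return False
--     if s[0] in operations or s[0] == ")":
--         return False
--     if s[-1] in special or s[-1] in "(~":
--         return False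
--     for x in range(n - 1):
--         a, b = s[x], s[x + 1]
--         if a in special and (b in special or b == ")"):
--             return False
--         if a in "@\\" and b in "(~":
--             return False
--         if a == "(" and b in operations:
--             return False
--         if a not in nonchars and b not in nonchars:
--             return False
--         if a in "@\\":
--             if first[b] <= x:
--                 return False
--             p = x + 2
--             while p < n and s[p] == "~":
--                 p += 1
--             end = nxt[p] if p < n else n
--             if last[b] >= end:
--                 return False
--     return True
-- ===== Notes on version B (the rewrite author's own statement) =====
-- stated objective: alternative
-- what changed: A's per-quantifier backward scan and forward paren-counting scope scan are replaced by one reverse sweep that precomputes a next-equal-paren-depth table (a depth-keyed dict) plus first/last-occurrence tables, so every quantifier check becomes dict lookups and the nested rescans disappear.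
import Mathlib
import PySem

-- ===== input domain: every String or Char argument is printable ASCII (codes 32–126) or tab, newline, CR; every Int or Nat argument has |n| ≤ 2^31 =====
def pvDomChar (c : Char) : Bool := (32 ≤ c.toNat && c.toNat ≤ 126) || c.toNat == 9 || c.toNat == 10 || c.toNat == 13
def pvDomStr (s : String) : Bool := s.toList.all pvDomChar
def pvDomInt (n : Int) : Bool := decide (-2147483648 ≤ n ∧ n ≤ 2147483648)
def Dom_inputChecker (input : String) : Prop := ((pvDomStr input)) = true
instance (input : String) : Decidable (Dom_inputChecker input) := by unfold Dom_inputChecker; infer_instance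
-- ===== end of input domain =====

-- B replaces A's per-quantifier backward scan and forward paren-counting scope scan by one reverse
-- sweep that precomputes next-equal-paren-depth / first-occurrence / last-occurrence tables, plus
-- one forward loop; return-value equivalence on Pre_.

-- character alphabets shared by both Pythons (the module constants special/operations/nonchars)
def pvSpecial : List Char := ['&', '|', '@', '\\', '$', '_', '%', '#']
def pvOperations : List Char := ['&', '|', '$', '_', '%', '#']
def pvNonchars : List Char := ['&', '|', '@', '\\', '$', '_', '%', '#', '~', '(', ')']

-- ===== PORT A =====

-- for x in range(len(input)-1): the adjacency checks
def aLoop2 (cs : List Char) (x : Nat) : Bool :=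
  if _h : x < cs.length - 1 then
    if pvSpecial.contains (cs.getD x ' ') then
      if pvSpecial.contains (cs.getD (x + 1) ' ') || cs.getD (x + 1) ' ' = ')' then false
      else if cs.getD x ' ' = '@' || cs.getD x ' ' = '\\' then
        if cs.getD (x + 1) ' ' = '(' || cs.getD (x + 1) ' ' = '~' then false
        else aLoop2 cs (x + 1)
      else aLoop2 cs (x + 1)
    else aLoop2 cs (x + 1)
  else true
termination_by cs.length - 1 - x

-- while x > 0 (descending): operation directly after '('
def aLoop5 (cs : List Char) : Nat → Bool
  | 0 => true
  | x + 1 =>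
    if pvOperations.contains (cs.getD (x + 1) ' ') && cs.getD x ' ' = '(' then false
    else aLoop5 cs x

-- while x < len(input): two adjacent plain characters; input[x+1] raises IndexError at x = len-1
def aLoop6 (cs : List Char) (x : Nat) : Bool :=
  if _h : x < cs.length then
    if !pvNonchars.contains (cs.getD x ' ') then
      if _h2 : x + 1 < cs.length then
        if !pvNonchars.contains (cs.getD (x + 1) ' ') then false else aLoop6 cs (x + 1)
      else true   -- Python raises IndexError reading input[x+1] here; excluded by Pre_
    else aLoop6 cs (x + 1)
  else true
termination_by cs.length - x

-- while back >= 0 (descending): curVar must not occur at or before x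
def aBack (cs : List Char) (v : Char) : Nat → Bool
  | 0 => if cs.getD 0 ' ' = v then false else true
  | b + 1 => if cs.getD (b + 1) ' ' = v then false else aBack cs v b

-- while input[parse] == "~" (Python reads past the end if the tail is all '~'; excluded by Pre_)
def aSkip (cs : List Char) (p : Nat) : Nat :=
  if h : PySem.List.pyGet? cs (p : Int) = some '~' then aSkip cs (p + 1) else p
termination_by cs.length - p
decreasing_by
  simp only [PySem.List.pyGet?_natCast] at h
  obtain ⟨hlt, -⟩ := List.getElem?_eq_some_iff.mp h
  omega

-- while parse < len(input): scan until the paren count returns to zero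
def aScope (cs : List Char) (p : Nat) (count : Int) : Nat :=
  if _h : p < cs.length then
    if (if cs.getD p ' ' = '(' then count + 1
        else if cs.getD p ' ' = ')' then count - 1 else count) = 0 then p + 1
    else aScope cs (p + 1)
        (if cs.getD p ' ' = '(' then count + 1
         else if cs.getD p ' ' = ')' then count - 1 else count)
  else p
termination_by cs.length - p

-- while parse < len(input): curVar must not occur after its scope
def aAfter (cs : List Char) (v : Char) (p : Nat) : Bool :=
  if _h : p < cs.length then
    if cs.getD p ' ' = v then false else aAfter cs v (p + 1)
  else true
termination_by cs.length - p

-- while x < len(input): the quantifier checks (curVar = input[x+1] is inlined)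
def aLoopQ (cs : List Char) (x : Nat) : Bool :=
  if _h : x < cs.length then
    if cs.getD x ' ' = '@' || cs.getD x ' ' = '\\' then
      if aBack cs (cs.getD (x + 1) ' ') x = false then false
      else if aAfter cs (cs.getD (x + 1) ' ') (aScope cs (aSkip cs (x + 2)) 0) = false then false
      else aLoopQ cs (x + 1)
    else aLoopQ cs (x + 1)
  else true
termination_by cs.length - x

def inputChecker (input : String) : Bool :=
  let cs := input.toList
  let parcount :=
    cs.foldl (fun acc c => if c = '(' then acc + 1 else if c = ')' then acc - 1 else acc) (0 : Int)
  if parcount ≠ 0 then false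
  else if aLoop2 cs 0 = false then false
  else
    match PySem.List.pyGet? cs (-1), PySem.List.pyGet? cs 0 with
    | some lc, some fc =>
      if pvSpecial.contains lc || lc = '(' || lc = '~' then false
      else if pvOperations.contains fc || fc = ')' then false
      else if aLoop5 cs (cs.length - 1) = false then false
      else if aLoop6 cs 0 = false then false
      else aLoopQ cs 0
    | _, _ => false   -- empty input: Python raises IndexError (excluded by Pre_)

-- ===== PORT B =====

-- while p < n and s[p] == "~"
def bSkip (cs : List Char) (p : Nat) : Nat :=
  if _h : p < cs.length ∧ cs.getD p ' ' = '~' then bSkip cs (p + 1) else p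
termination_by cs.length - p

-- the reverse sweep: for i in range(n-1, -1, -1): d, nxt[i], seen[d], first[c], last[c]
def bSweep (cs : List Char) : Nat → Int → PySem.Dict Int Nat → PySem.Dict Nat Nat →
    PySem.Dict Char Nat → PySem.Dict Char Nat →
    Int × PySem.Dict Nat Nat × PySem.Dict Char Nat × PySem.Dict Char Nat
  | 0, d, _, nxt, first, last => (d, nxt, first, last)
  | i + 1, d, seen, nxt, first, last =>
    let c := cs.getD i ' '
    let d' := d - (if c = '(' then 1 else 0) + (if c = ')' then 1 else 0)
    bSweep cs i d' (seen.insert d' i) (nxt.insert i ((seen.get? d').getD cs.length))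
      (first.insert c i)
      (if (last.get? c).isNone then last.insert c i else last)

-- for x in range(n-1): the pair checks and the table-based quantifier checks
-- (a = s[x], b = s[x+1] are inlined; first/last always hold the key b = s[x+1],
-- so the .getD defaults are unreachable)
def bMain (cs : List Char) (nxt : PySem.Dict Nat Nat) (first last : PySem.Dict Char Nat)
    (x : Nat) : Bool :=
  if _h : x < cs.length - 1 then
    if pvSpecial.contains (cs.getD x ' ')
        && (pvSpecial.contains (cs.getD (x + 1) ' ') || cs.getD (x + 1) ' ' = ')') then false
    else if (cs.getD x ' ' = '@' || cs.getD x ' ' = '\\')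
        && (cs.getD (x + 1) ' ' = '(' || cs.getD (x + 1) ' ' = '~') then false
    else if cs.getD x ' ' = '(' && pvOperations.contains (cs.getD (x + 1) ' ') then false
    else if !pvNonchars.contains (cs.getD x ' ')
        && !pvNonchars.contains (cs.getD (x + 1) ' ') then false
    else if cs.getD x ' ' = '@' || cs.getD x ' ' = '\\' then
      if (first.get? (cs.getD (x + 1) ' ')).getD 0 ≤ x then false
      else if (if bSkip cs (x + 2) < cs.length
            then (nxt.get? (bSkip cs (x + 2))).getD cs.length else cs.length)
          ≤ (last.get? (cs.getD (x + 1) ' ')).getD 0 then false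
      else bMain cs nxt first last (x + 1)
    else bMain cs nxt first last (x + 1)
  else true
termination_by cs.length - 1 - x

def inputChecker_alt (input : String) : Bool :=
  let cs := input.toList
  let n := cs.length
  if n = 0 then false
  else
    let r := bSweep cs n 0 (PySem.Dict.empty.insert (0 : Int) n)
      PySem.Dict.empty PySem.Dict.empty PySem.Dict.empty
    if r.1 ≠ 0 then false
    else if pvOperations.contains (cs.getD 0 ' ') || cs.getD 0 ' ' = ')' then false
    else if pvSpecial.contains (cs.getD (n - 1) ' ') || ['(', '~'].contains (cs.getD (n - 1) ' ')
      then false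
    else bMain cs r.2.1 r.2.2.1 r.2.2.2 0

-- ===== PRECONDITION & SPEC =====

-- any bad adjacent pair (disjunction of A's four adjacency rules)
def pvBadPair (a b : Char) : Bool :=
  (pvSpecial.contains a && (pvSpecial.contains b || b = ')'))
  || ((a = '@' || a = '\\') && (b = '(' || b = '~'))
  || (a = '(' && pvOperations.contains b)
  || (!pvNonchars.contains a && !pvNonchars.contains b)

-- some check preceding A's final scan already fails (so A returns False before it can crash)
def pvEarly (cs : List Char) : Prop :=
  cs.count '(' ≠ cs.count ')'
  ∨ (∃ x < cs.length - 1, pvBadPair (cs.getD x ' ') (cs.getD (x + 1) ' ') = true)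
  ∨ (pvOperations.contains (cs.getD 0 ' ') || cs.getD 0 ' ' = ')') = true
  ∨ (pvSpecial.contains (cs.getD (cs.length - 1) ' ')
     || cs.getD (cs.length - 1) ' ' = '(' || cs.getD (cs.length - 1) ' ' = '~') = true

-- Pre_ excludes exactly the inputs on which A raises IndexError: the empty string, and strings whose
-- last character is outside the nonchars alphabet while no earlier check fails (A's final scan then
-- reads input[x+1] one past the end).
def Pre_inputChecker (input : String) : Prop :=
  input.toList ≠ [] ∧
  (pvNonchars.contains (input.toList.getD (input.toList.length - 1) ' ') = true
   ∨ pvEarly input.toList)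
instance (input : String) : Decidable (Pre_inputChecker input) := by
  unfold Pre_inputChecker pvEarly; infer_instance

def pvWitness_inputChecker : String := "(p&q)"

def Spec_inputChecker (input : String) (out : Bool) : Prop := out = inputChecker_alt input
instance (input : String) (out : Bool) : Decidable (Spec_inputChecker input out) := by
  unfold Spec_inputChecker; infer_instance

-- ===== CLAIM (what is proved, stated in full; the proofs are below) =====
def Claim_equal_inputChecker : Prop :=
  ∀ (input : String), Dom_inputChecker input → Pre_inputChecker input →
    Spec_inputChecker input (inputChecker input)

-- ===== LEMMAS AND PROOFS =====

theorem step_iff {Q : Nat → Prop} (x : Nat) (hx : Q x) :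
    (∀ y, x + 1 ≤ y → Q y) ↔ (∀ y, x ≤ y → Q y) := by
  constructor
  · intro hall y hy
    rcases eq_or_lt_of_le hy with rfl | h
    · exact hx
    · exact hall y h
  · intro hall y hy
    exact hall y (by omega)

theorem pyGet?_some_facts (cs : List Char) (i : Nat) (c : Char)
    (h : PySem.List.pyGet? cs (i : Int) = some c) : i < cs.length ∧ cs.getD i ' ' = c := by
  simp only [PySem.List.pyGet?_natCast] at h
  obtain ⟨hlt, he⟩ := List.getElem?_eq_some_iff.mp h
  exact ⟨hlt, by simp [hlt, he]⟩

theorem foldl_parcount (cs : List Char) (acc : Int) :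
    cs.foldl (fun acc c => if c = '(' then acc + 1 else if c = ')' then acc - 1 else acc) acc
      = acc + cs.count '(' - cs.count ')' := by
  induction cs generalizing acc with
  | nil => simp
  | cons c cs ih =>
    simp only [List.foldl_cons, ih, List.count_cons]
    by_cases h1 : c = '(' <;> by_cases h2 : c = ')' <;> simp [h1, h2] <;> omega

-- the body of A's second loop, as one Bool per pair
def aBad2 (a b : Char) : Bool :=
  pvSpecial.contains a &&
    ((pvSpecial.contains b || b = ')') || ((a = '@' || a = '\\') && (b = '(' || b = '~')))

theorem aBad2_true1 {a b : Char} (h1 : pvSpecial.contains a = true)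
    (h2 : (pvSpecial.contains b || decide (b = ')')) = true) : aBad2 a b = true := by
  unfold aBad2
  rw [h1, h2, Bool.true_or, Bool.true_and]

theorem aBad2_true2 {a b : Char} (h1 : pvSpecial.contains a = true)
    (hat : (decide (a = '@') || decide (a = '\\')) = true)
    (h2 : (decide (b = '(') || decide (b = '~')) = true) : aBad2 a b = true := by
  unfold aBad2
  rw [h1, hat, h2, Bool.true_and, Bool.true_and, Bool.or_true]

theorem aBad2_false1 {a b : Char} (h1 : (pvSpecial.contains b || decide (b = ')')) = false)
    (h2 : (decide (b = '(') || decide (b = '~')) = false) : aBad2 a b = false := by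
  unfold aBad2
  rw [h1, h2, Bool.and_false, Bool.false_or, Bool.and_false]

theorem aBad2_false2 {a b : Char} (h1 : (pvSpecial.contains b || decide (b = ')')) = false)
    (h2 : (decide (a = '@') || decide (a = '\\')) = false) : aBad2 a b = false := by
  unfold aBad2
  rw [h1, h2, Bool.false_and, Bool.false_or, Bool.and_false]

theorem aBad2_false3 {a b : Char} (h : pvSpecial.contains a = false) : aBad2 a b = false := by
  unfold aBad2
  rw [h, Bool.false_and]

theorem aLoop2_iff (cs : List Char) (x : Nat) :
    aLoop2 cs x = true ↔ ∀ y, x ≤ y → y + 1 < cs.length →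
      aBad2 (cs.getD y ' ') (cs.getD (y + 1) ' ') = false := by
  induction x using aLoop2.induct cs with
  | case1 x h hs hb =>
    rw [aLoop2, dif_pos h, if_pos hs, if_pos hb]
    refine iff_of_false (by decide) (fun hall => ?_)
    have hx := hall x le_rfl (by omega)
    rw [aBad2_true1 hs hb] at hx
    exact absurd hx (by decide)
  | case2 x h hs hb hat hb2 =>
    rw [aLoop2, dif_pos h, if_pos hs, if_neg hb, if_pos hat, if_pos hb2]
    refine iff_of_false (by decide) (fun hall => ?_)
    have hx := hall x le_rfl (by omega)
    rw [aBad2_true2 hs hat hb2] at hx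
    exact absurd hx (by decide)
  | case3 x h hs hb hat hb2 ih =>
    rw [aLoop2, dif_pos h, if_pos hs, if_neg hb, if_pos hat, if_neg hb2, ih]
    exact step_iff x (fun _ =>
      aBad2_false1 (Bool.eq_false_iff.mpr hb) (Bool.eq_false_iff.mpr hb2))
  | case4 x h hs hb hat ih =>
    rw [aLoop2, dif_pos h, if_pos hs, if_neg hb, if_neg hat, ih]
    exact step_iff x (fun _ =>
      aBad2_false2 (Bool.eq_false_iff.mpr hb) (Bool.eq_false_iff.mpr hat))
  | case5 x h hs ih =>
    rw [aLoop2, dif_pos h, if_neg hs, ih]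
    exact step_iff x (fun _ => aBad2_false3 (Bool.eq_false_iff.mpr hs))
  | case6 x h =>
    rw [aLoop2, dif_neg h]
    simp only [true_iff]
    intro y hy hlt
    omega

theorem aLoop5_iff (cs : List Char) (m : Nat) :
    aLoop5 cs m = true ↔ ∀ y, y + 1 ≤ m →
      (cs.getD y ' ' = '(' && pvOperations.contains (cs.getD (y + 1) ' ')) = false := by
  induction m with
  | zero => simp [aLoop5]
  | succ m ih =>
    rw [aLoop5]
    by_cases h : (pvOperations.contains (cs.getD (m + 1) ' ') && cs.getD m ' ' = '(') = true
    · rw [if_pos h]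
      refine iff_of_false (by decide) (fun hall => ?_)
      have hx := hall m le_rfl
      obtain ⟨hop, hpar⟩ := (Bool.and_eq_true _ _).mp h
      rw [hpar, hop, Bool.and_true] at hx
      exact absurd hx (by decide)
    · rw [if_neg h, ih]
      constructor
      · intro hall y hy
        rcases Nat.lt_or_ge (y + 1) (m + 1) with hlt | hge
        · exact hall y (by omega)
        · have hym : y = m := by omega
          subst hym
          by_cases hpar : cs.getD y ' ' = '('
          · have hop : pvOperations.contains (cs.getD (y + 1) ' ') = false := by
              by_contra hh
              rw [Bool.not_eq_false] at hh
              exact h (by rw [hh, Bool.true_and, decide_eq_true_eq]; exact hpar)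
            rw [hop, Bool.and_false]
          · rw [decide_eq_false hpar, Bool.false_and]
      · intro hall y hy
        exact hall y (by omega)

theorem aLoop6_iff (cs : List Char) (x : Nat) :
    aLoop6 cs x = true ↔ ∀ y, x ≤ y → y + 1 < cs.length →
      (!pvNonchars.contains (cs.getD y ' ') && !pvNonchars.contains (cs.getD (y + 1) ' ')) = false := by
  induction x using aLoop6.induct cs with
  | case1 x h hnn h2 hnn2 =>
    rw [aLoop6, dif_pos h, if_pos hnn, dif_pos h2, if_pos hnn2]
    refine iff_of_false (by decide) (fun hall => ?_)
    have hx := hall x le_rfl h2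
    rw [hnn, hnn2, Bool.and_self] at hx
    exact absurd hx (by decide)
  | case2 x h hnn h2 hnn2 ih =>
    rw [aLoop6, dif_pos h, if_pos hnn, dif_pos h2, if_neg hnn2, ih]
    refine step_iff x (fun _ => ?_)
    rw [Bool.eq_false_iff.mpr hnn2, Bool.and_false]
  | case3 x h hnn h2 =>
    rw [aLoop6, dif_pos h, if_pos hnn, dif_neg h2]
    simp only [true_iff]
    intro y hy hlt
    omega
  | case4 x h hnn ih =>
    rw [aLoop6, dif_pos h, if_neg hnn, ih]
    refine step_iff x (fun _ => ?_)
    rw [Bool.eq_false_iff.mpr hnn, Bool.false_and]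
  | case5 x h =>
    rw [aLoop6, dif_neg h]
    simp only [true_iff]
    intro y hy hlt
    omega

theorem badPair_split (a b : Char) :
    pvBadPair a b =
      (aBad2 a b || (a = '(' && pvOperations.contains b)
        || (!pvNonchars.contains a && !pvNonchars.contains b)) := by
  rw [Bool.eq_iff_iff]
  have hat : (a = '@' ∨ a = '\\') → a ∈ pvSpecial := by rintro (rfl | rfl) <;> decide
  simp only [pvBadPair, aBad2, Bool.or_eq_true_iff, Bool.and_eq_true, Bool.not_eq_true',
    List.contains_eq_mem, decide_eq_true_eq]
  tauto

theorem aBack_iff (cs : List Char) (v : Char) (x : Nat) :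
    aBack cs v x = true ↔ ∀ b ≤ x, cs.getD b ' ' ≠ v := by
  induction x with
  | zero =>
    rw [aBack]
    by_cases h : cs.getD 0 ' ' = v
    · rw [if_pos h]
      exact iff_of_false (by decide) (fun hall => hall 0 le_rfl h)
    · rw [if_neg h]
      refine iff_of_true rfl (fun b hb => ?_)
      interval_cases b
      exact h
  | succ x ih =>
    rw [aBack]
    by_cases h : cs.getD (x + 1) ' ' = v
    · rw [if_pos h]
      exact iff_of_false (by decide) (fun hall => hall (x + 1) le_rfl h)
    · rw [if_neg h, ih]
      constructor
      · intro hall b hb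
        rcases Nat.lt_or_ge b (x + 1) with hlt | hge
        · exact hall b (by omega)
        · have hbe : b = x + 1 := by omega
          subst hbe; exact h
      · intro hall b hb
        exact hall b (by omega)

theorem take_contains_iff (cs : List Char) (v : Char) (x : Nat) :
    (cs.take (x + 1)).contains v = true ↔ ∃ b, b ≤ x ∧ b < cs.length ∧ cs.getD b ' ' = v := by
  rw [List.contains_iff_mem, List.mem_take_iff_getElem]
  constructor
  · rintro ⟨i, hi, he⟩
    refine ⟨i, by omega, by omega, ?_⟩
    have hil : i < cs.length := by omega
    simp [List.getD_eq_getElem?_getD, List.getElem?_eq_getElem hil, he]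
  · rintro ⟨b, hb, hblt, he⟩
    refine ⟨b, by omega, ?_⟩
    rw [List.getD_eq_getElem?_getD, List.getElem?_eq_getElem hblt] at he
    simpa using he

theorem drop_contains_iff (cs : List Char) (v : Char) (e : Nat) :
    (cs.drop e).contains v = true ↔ ∃ j, e ≤ j ∧ j < cs.length ∧ cs.getD j ' ' = v := by
  rw [List.contains_iff_mem]
  constructor
  · intro hm
    obtain ⟨i, hi, he⟩ := List.mem_iff_getElem.mp hm
    rw [List.length_drop] at hi
    rw [List.getElem_drop] at he
    refine ⟨e + i, by omega, by omega, ?_⟩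
    rw [List.getD_eq_getElem?_getD, List.getElem?_eq_getElem (by omega)]
    simpa using he
  · rintro ⟨j, h1, h2, h3⟩
    rw [List.getD_eq_getElem?_getD, List.getElem?_eq_getElem h2] at h3
    rw [List.mem_iff_getElem]
    refine ⟨j - e, by rw [List.length_drop]; omega, ?_⟩
    have hj : e + (j - e) = j := by omega
    simp only [List.getElem_drop, hj]
    simpa using h3

theorem aAfter_iff (cs : List Char) (v : Char) (p : Nat) :
    aAfter cs v p = true ↔ (cs.drop p).contains v = false := by
  induction p using aAfter.induct cs v with
  | case1 p h he =>
    rw [aAfter, dif_pos h, if_pos he]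
    refine iff_of_false (by decide) (fun hcf => ?_)
    rw [List.drop_eq_getElem_cons h, List.contains_cons] at hcf
    have hg : cs[p] = v := by
      rw [← he, List.getD_eq_getElem?_getD, List.getElem?_eq_getElem h]; rfl
    rw [hg, beq_self_eq_true, Bool.true_or] at hcf
    exact absurd hcf (by decide)
  | case2 p h he ih =>
    rw [aAfter, dif_pos h, if_neg he, ih, List.drop_eq_getElem_cons h, List.contains_cons]
    have hg : cs[p] ≠ v := by
      intro hh
      apply he
      rw [List.getD_eq_getElem?_getD, List.getElem?_eq_getElem h]
      exact hh
    have hb : (v == cs[p]) = false := beq_eq_false_iff_ne.mpr (fun hh => hg hh.symm)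
    rw [hb, Bool.false_or]
  | case3 p h =>
    rw [aAfter, dif_neg h]
    rw [List.drop_eq_nil_of_le (by omega)]
    simp

theorem skip_eq (cs : List Char) (p : Nat) : aSkip cs p = bSkip cs p := by
  induction p using aSkip.induct cs with
  | case1 p h ih =>
    obtain ⟨hlt, he⟩ := pyGet?_some_facts cs p '~' h
    rw [aSkip, dif_pos h, ih]
    conv_rhs => rw [bSkip, dif_pos ⟨hlt, he⟩]
  | case2 p h =>
    rw [aSkip, dif_neg h, bSkip, dif_neg]
    rintro ⟨hlt, he⟩
    apply h
    rw [PySem.List.pyGet?_natCast, List.getElem?_eq_getElem hlt]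
    have hg : cs.getD p ' ' = cs[p] := by simp [hlt]
    rw [hg] at he
    simp [he]

theorem bSkip_le (cs : List Char) (p : Nat) (h : p ≤ cs.length) : bSkip cs p ≤ cs.length := by
  induction p using bSkip.induct cs with
  | case1 p hc ih => rw [bSkip, dif_pos hc]; exact ih (by omega)
  | case2 p hc => rw [bSkip, dif_neg hc]; exact h

theorem count_step_eq (c : Char) (k : Int) :
    k + (if c = '(' then (1 : Int) else 0) - (if c = ')' then (1 : Int) else 0)
      = (if c = '(' then k + 1 else if c = ')' then k - 1 else k) := by
  by_cases h1 : c = '('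
  · simp [h1]
  · by_cases h2 : c = ')' <;> simp [h1, h2]

theorem bool_eq_true_of_ne_false {b : Bool} (h : ¬ b = false) : b = true := by
  cases b
  · exact absurd rfl h
  · rfl

-- phase propositions shared by both characterizations
def pvP1 (cs : List Char) : Prop := cs.count '(' = cs.count ')'
def pvFirstOk (cs : List Char) : Prop :=
  (pvOperations.contains (cs.getD 0 ' ') || cs.getD 0 ' ' = ')') = false
def pvLastOk (cs : List Char) : Prop :=
  (pvSpecial.contains (cs.getD (cs.length - 1) ' ')
   || cs.getD (cs.length - 1) ' ' = '(' || cs.getD (cs.length - 1) ' ' = '~') = false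
def pvPairsOk (cs : List Char) : Prop :=
  ∀ y, y + 1 < cs.length → pvBadPair (cs.getD y ' ') (cs.getD (y + 1) ' ') = false
def pvQA (cs : List Char) : Prop :=
  ∀ y, y < cs.length → (cs.getD y ' ' = '@' ∨ cs.getD y ' ' = '\\') →
    (aBack cs (cs.getD (y + 1) ' ') y = true ∧
     aAfter cs (cs.getD (y + 1) ' ') (aScope cs (aSkip cs (y + 2)) 0) = true)
def pvQB (cs : List Char) : Prop :=
  ∀ y, y + 1 < cs.length → (cs.getD y ' ' = '@' ∨ cs.getD y ' ' = '\\') →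
    ((cs.take (y + 1)).contains (cs.getD (y + 1) ' ') = false ∧
     (cs.drop (aScope cs (aSkip cs (y + 2)) 0)).contains (cs.getD (y + 1) ' ') = false)

theorem pairsOk_iff (cs : List Char) :
    (aLoop2 cs 0 = true ∧ aLoop5 cs (cs.length - 1) = true ∧ aLoop6 cs 0 = true)
      ↔ pvPairsOk cs := by
  rw [aLoop2_iff, aLoop5_iff, aLoop6_iff, pvPairsOk]
  constructor
  · rintro ⟨h2, h5, h6⟩ y hy
    rw [badPair_split]
    simp only [Bool.or_eq_false_iff]
    exact ⟨⟨h2 y (by omega) hy, by simpa using h5 y (by omega)⟩, h6 y (by omega) hy⟩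
  · intro hall
    refine ⟨fun y _ hy => ?_, fun y hy => ?_, fun y _ hy => ?_⟩
    · have := hall y hy
      rw [badPair_split] at this
      simp only [Bool.or_eq_false_iff] at this
      exact this.1.1
    · have := hall y (by omega)
      rw [badPair_split] at this
      simp only [Bool.or_eq_false_iff] at this
      simpa using this.1.2
    · have := hall y hy
      rw [badPair_split] at this
      simp only [Bool.or_eq_false_iff] at this
      exact this.2

theorem aLoopQ_iff (cs : List Char) (x : Nat) :
    aLoopQ cs x = true ↔ ∀ y, x ≤ y → y < cs.length →
      (cs.getD y ' ' = '@' ∨ cs.getD y ' ' = '\\') →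
      (aBack cs (cs.getD (y + 1) ' ') y = true ∧
       aAfter cs (cs.getD (y + 1) ' ') (aScope cs (aSkip cs (y + 2)) 0) = true) := by
  induction x using aLoopQ.induct cs with
  | case1 x h hat hback =>
    rw [aLoopQ, dif_pos h, if_pos hat, if_pos hback]
    refine iff_of_false (by decide) (fun hall => ?_)
    obtain ⟨hb1, -⟩ := hall x le_rfl h (by simpa using hat)
    rw [hback] at hb1
    exact absurd hb1 (by decide)
  | case2 x h hat hback hafter =>
    rw [aLoopQ, dif_pos h, if_pos hat, if_neg hback, if_pos hafter]
    refine iff_of_false (by decide) (fun hall => ?_)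
    obtain ⟨-, hb2⟩ := hall x le_rfl h (by simpa using hat)
    rw [hafter] at hb2
    exact absurd hb2 (by decide)
  | case3 x h hat hback hafter ih =>
    rw [aLoopQ, dif_pos h, if_pos hat, if_neg hback, if_neg hafter, ih]
    exact step_iff x (fun _ _ =>
      ⟨bool_eq_true_of_ne_false hback, bool_eq_true_of_ne_false hafter⟩)
  | case4 x h hat ih =>
    rw [aLoopQ, dif_pos h, if_neg hat, ih]
    exact step_iff x (fun _ hg => absurd hg (by simpa using hat))
  | case5 x h =>
    rw [aLoopQ, dif_neg h]
    simp only [true_iff]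
    intro y hy hlt
    omega

theorem qa_iff_qb (cs : List Char) (hlast : pvLastOk cs) : pvQA cs ↔ pvQB cs := by
  have hconv : ∀ y, y + 1 < cs.length →
      ((aBack cs (cs.getD (y + 1) ' ') y = true ↔
        (cs.take (y + 1)).contains (cs.getD (y + 1) ' ') = false) ∧
       (aAfter cs (cs.getD (y + 1) ' ') (aScope cs (aSkip cs (y + 2)) 0) = true ↔
        (cs.drop (aScope cs (aSkip cs (y + 2)) 0)).contains (cs.getD (y + 1) ' ') = false)) := by
    intro y hy
    constructor
    · rw [aBack_iff]
      constructor
      · intro hall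
        by_contra hcc
        obtain ⟨b, hb, -, he⟩ := take_contains_iff cs _ y |>.mp (bool_eq_true_of_ne_false hcc)
        exact hall b hb he
      · intro hcf b hb he
        have : (cs.take (y + 1)).contains (cs.getD (y + 1) ' ') = true :=
          (take_contains_iff cs _ y).mpr ⟨b, hb, by omega, he⟩
        rw [hcf] at this
        exact absurd this (by decide)
    · exact aAfter_iff cs _ _
  constructor
  · intro hqa y hy hg
    obtain ⟨h1, h2⟩ := hqa y (by omega) hg
    exact ⟨((hconv y hy).1).mp h1, ((hconv y hy).2).mp h2⟩
  · intro hqb y hy hg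
    by_cases hy1 : y + 1 < cs.length
    · obtain ⟨h1, h2⟩ := hqb y hy1 hg
      exact ⟨((hconv y hy1).1).mpr h1, ((hconv y hy1).2).mpr h2⟩
    · exfalso
      have hyl : y = cs.length - 1 := by omega
      rw [pvLastOk] at hlast
      have hsp : pvSpecial.contains (cs.getD (cs.length - 1) ' ') = true := by
        rcases hg with hg | hg <;> rw [hyl] at hg <;> rw [hg] <;> decide
      rw [hsp, Bool.true_or, Bool.true_or] at hlast
      exact absurd hlast (by decide)

theorem A_iff (input : String) (hne : input.toList ≠ []) :
    inputChecker input = true ↔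
      (pvP1 input.toList ∧ pvLastOk input.toList ∧ pvFirstOk input.toList ∧
       pvPairsOk input.toList ∧ pvQA input.toList) := by
  have hn : 0 < input.toList.length := List.length_pos_iff.mpr hne
  have hget1 : PySem.List.pyGet? input.toList (-1)
      = some (input.toList.getD (input.toList.length - 1) ' ') := by
    rw [PySem.List.pyGet?_neg_ofNat input.toList 1 (by omega) (by omega)]
    rw [List.getElem?_eq_getElem (by omega)]
    rw [List.getD_eq_getElem?_getD, List.getElem?_eq_getElem (by omega)]
    rfl
  have hget0 : PySem.List.pyGet? input.toList 0
      = some (input.toList.getD 0 ' ') := by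
    rw [show (0 : Int) = ((0 : Nat) : Int) from rfl, PySem.List.pyGet?_natCast]
    rw [List.getElem?_eq_getElem hn]
    rw [List.getD_eq_getElem?_getD, List.getElem?_eq_getElem hn]
    rfl
  rw [inputChecker]
  simp only [foldl_parcount, hget1, hget0, zero_add]
  have hc1 : ((input.toList.count '(' : Int) - input.toList.count ')' ≠ 0) ↔
      ¬ pvP1 input.toList := by
    rw [pvP1]; omega
  by_cases h1 : pvP1 input.toList
  · rw [if_neg (by rw [hc1]; exact fun h => h h1)]
    by_cases h2 : aLoop2 input.toList 0 = false
    · rw [if_pos h2]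
      refine iff_of_false (by decide) ?_
      rintro ⟨-, -, -, hp, -⟩
      rw [← pairsOk_iff] at hp
      rw [hp.1] at h2
      exact absurd h2 (by decide)
    · rw [if_neg h2]
      by_cases h3 : (pvSpecial.contains (input.toList.getD (input.toList.length - 1) ' ')
          || input.toList.getD (input.toList.length - 1) ' ' = '('
          || input.toList.getD (input.toList.length - 1) ' ' = '~') = true
      · rw [if_pos h3]
        refine iff_of_false (by decide) ?_
        rintro ⟨-, hl, -, -, -⟩
        rw [pvLastOk] at hl
        rw [hl] at h3
        exact absurd h3 (by decide)
      · rw [if_neg h3]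
        by_cases h4 : (pvOperations.contains (input.toList.getD 0 ' ')
            || input.toList.getD 0 ' ' = ')') = true
        · rw [if_pos h4]
          refine iff_of_false (by decide) ?_
          rintro ⟨-, -, hf, -, -⟩
          rw [pvFirstOk] at hf
          rw [hf] at h4
          exact absurd h4 (by decide)
        · rw [if_neg h4]
          by_cases h5 : aLoop5 input.toList (input.toList.length - 1) = false
          · rw [if_pos h5]
            refine iff_of_false (by decide) ?_
            rintro ⟨-, -, -, hp, -⟩
            rw [← pairsOk_iff] at hp
            rw [hp.2.1] at h5
            exact absurd h5 (by decide)
          · rw [if_neg h5]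
            by_cases h6 : aLoop6 input.toList 0 = false
            · rw [if_pos h6]
              refine iff_of_false (by decide) ?_
              rintro ⟨-, -, -, hp, -⟩
              rw [← pairsOk_iff] at hp
              rw [hp.2.2] at h6
              exact absurd h6 (by decide)
            · rw [if_neg h6]
              rw [aLoopQ_iff]
              constructor
              · intro hq
                refine ⟨h1, Bool.eq_false_iff.mpr h3, Bool.eq_false_iff.mpr h4, ?_, ?_⟩
                · rw [← pairsOk_iff]
                  exact ⟨bool_eq_true_of_ne_false h2, bool_eq_true_of_ne_false h5,
                    bool_eq_true_of_ne_false h6⟩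
                · intro y hy hg
                  exact hq y (by omega) hy hg
              · rintro ⟨-, -, -, -, hq⟩ y _ hy hg
                exact hq y hy hg
  · rw [if_pos (by rw [hc1]; exact h1)]
    refine iff_of_false (by decide) ?_
    rintro ⟨hp1, -⟩
    exact h1 hp1

-- ===== B-side lemmas =====

-- paren depth of the prefix s[:i]
def pvD (cs : List Char) (i : Nat) : Int :=
  ((cs.take i).count '(' : Int) - ((cs.take i).count ')' : Int)

-- where A's scope scan started at p (with count 0) stops: the least m > p with equal depth, else n
def pvNext (cs : List Char) (p : Nat) : Nat :=
  ((List.range' (p + 1) (cs.length - p)).find? (fun m => pvD cs m = pvD cs p)).getD cs.length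

theorem find?_congr' {α : Type} (l : List α) (p q : α → Bool) (h : ∀ a ∈ l, p a = q a) :
    l.find? p = l.find? q := by
  induction l with
  | nil => rfl
  | cons a l ih =>
    simp only [List.find?_cons]
    rw [h a (by simp)]
    cases q a <;> simp_all

theorem pvD_succ (cs : List Char) (p : Nat) (h : p < cs.length) :
    pvD cs (p + 1) = pvD cs p + (if cs.getD p ' ' = '(' then (1 : Int) else 0)
      - (if cs.getD p ' ' = ')' then (1 : Int) else 0) := by
  unfold pvD
  rw [List.take_add_one, List.getElem?_eq_getElem h]
  have hg : cs.getD p ' ' = cs[p] := by simp [h]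
  rw [hg]
  simp only [Option.toList_some, List.count_append]
  by_cases h1 : cs[p] = '(' <;> by_cases h2 : cs[p] = ')' <;>
    simp [h1, h2] <;> omega

theorem aScope_char (cs : List Char) (p : Nat) (c : Int) :
    p ≤ cs.length → aScope cs p c =
      ((List.range' (p + 1) (cs.length - p)).find? (fun m => pvD cs m = pvD cs p - c)).getD
        cs.length := by
  induction p, c using aScope.induct cs with
  | case1 p count hlt hz =>
    intro hp
    simp only [dite_eq_ite] at hz
    rw [aScope, dif_pos hlt, if_pos hz]
    rw [← count_step_eq] at hz
    have hd := pvD_succ cs p hlt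
    have hnp : cs.length - p = (cs.length - (p + 1)) + 1 := by omega
    rw [hnp, List.range'_succ, List.find?_cons_of_pos (by
      rw [decide_eq_true_eq]; omega)]
    rfl
  | case2 p count hlt hz ih =>
    intro hp
    simp only [dite_eq_ite] at hz ih
    rw [aScope, dif_pos hlt, if_neg hz]
    rw [← count_step_eq] at hz
    have hd := pvD_succ cs p hlt
    have hnp : cs.length - p = (cs.length - (p + 1)) + 1 := by omega
    rw [ih (by omega), hnp, List.range'_succ, List.find?_cons_of_neg (by
      simp only [decide_eq_true_eq]; omega)]
    congr 1
    apply find?_congr'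
    intro m _
    rw [← count_step_eq]
    apply decide_eq_decide.mpr
    omega
  | case3 p count hlt =>
    intro hp
    rw [aScope, dif_neg hlt]
    have hp' : p = cs.length := by omega
    subst hp'
    simp

theorem bSweep_spec (cs : List Char) :
    ∀ (i : Nat) (d : Int) (seen : PySem.Dict Int Nat) (nxt : PySem.Dict Nat Nat)
      (first last : PySem.Dict Char Nat),
      i ≤ cs.length →
      d = pvD cs i - pvD cs cs.length →
      (∀ t, seen.get? t =
        (List.range' i (cs.length + 1 - i)).find? (fun j => pvD cs j - pvD cs cs.length = t)) →
      (∀ p, i ≤ p → p < cs.length → nxt.get? p = some (pvNext cs p)) →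
      (∀ c, first.get? c =
        (List.range' i (cs.length - i)).find? (fun j => cs.getD j ' ' = c)) →
      (∀ c, last.get? c =
        (List.range' i (cs.length - i)).reverse.find? (fun j => cs.getD j ' ' = c)) →
      (bSweep cs i d seen nxt first last).1 = pvD cs 0 - pvD cs cs.length ∧
      (∀ p, p < cs.length → (bSweep cs i d seen nxt first last).2.1.get? p = some (pvNext cs p)) ∧
      (∀ c, (bSweep cs i d seen nxt first last).2.2.1.get? c =
        (List.range' 0 cs.length).find? (fun j => cs.getD j ' ' = c)) ∧
      (∀ c, (bSweep cs i d seen nxt first last).2.2.2.get? c =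
        (List.range' 0 cs.length).reverse.find? (fun j => cs.getD j ' ' = c)) := by
  intro i
  induction i with
  | zero =>
    intro d seen nxt first last _ hd hseen hnxt hfirst hlast
    rw [bSweep]
    refine ⟨by simpa [pvD] using hd, fun p hp => hnxt p (by omega) hp,
      by simpa using hfirst, by simpa using hlast⟩
  | succ i ih =>
    intro d seen nxt first last hi hd hseen hnxt hfirst hlast
    have hlt : i < cs.length := by omega
    have hd1 := pvD_succ cs i hlt
    rw [bSweep]
    have hdnew : d - (if cs.getD i ' ' = '(' then (1 : Int) else 0)
        + (if cs.getD i ' ' = ')' then (1 : Int) else 0)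
        = pvD cs i - pvD cs cs.length := by omega
    -- the range at level i is i :: (range at level i+1)
    have hr1 : cs.length + 1 - i = (cs.length + 1 - (i + 1)) + 1 := by omega
    have hr2 : cs.length - i = (cs.length - (i + 1)) + 1 := by omega
    apply ih _ _ _ _ _ (by omega) hdnew
    · -- seen invariant
      intro t
      rw [PySem.Dict.get?_insert, hr1, List.range'_succ]
      by_cases ht : t = d - (if cs.getD i ' ' = '(' then (1 : Int) else 0)
        + (if cs.getD i ' ' = ')' then (1 : Int) else 0)
      · rw [if_pos ht, List.find?_cons_of_pos (by rw [decide_eq_true_eq]; omega)]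
      · rw [if_neg ht, List.find?_cons_of_neg (by simp only [decide_eq_true_eq]; omega),
          hseen t]
    · -- nxt invariant
      intro p hp1 hp2
      rw [PySem.Dict.get?_insert]
      by_cases hpi : p = i
      · rw [if_pos hpi, hpi, hseen]
        congr 1
        rw [pvNext]
        have hr3 : cs.length + 1 - (i + 1) = cs.length - i := by omega
        rw [hr3]
        have : (List.range' (i + 1) (cs.length - i)).find?
              (fun j => pvD cs j - pvD cs cs.length
                = d - (if cs.getD i ' ' = '(' then (1 : Int) else 0)
                    + (if cs.getD i ' ' = ')' then (1 : Int) else 0))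
            = (List.range' (i + 1) (cs.length - i)).find? (fun m => pvD cs m = pvD cs i) := by
          apply find?_congr'
          intro m _
          apply decide_eq_decide.mpr
          omega
        rw [this]
      · rw [if_neg hpi, hnxt p (by omega) hp2]
    · -- first invariant
      intro c
      rw [PySem.Dict.get?_insert, hr2, List.range'_succ]
      by_cases hc : c = cs.getD i ' '
      · subst hc
        rw [if_pos rfl, List.find?_cons_of_pos (by rw [decide_eq_true_eq])]
      · rw [if_neg hc,
          List.find?_cons_of_neg (by simp only [decide_eq_true_eq]; exact fun h => hc h.symm),
          hfirst c]
    · -- last invariant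
      intro c
      rw [hr2, List.range'_succ, List.reverse_cons, List.find?_append]
      have hsing : List.find? (fun j => decide (cs.getD j ' ' = c)) [i]
          = if c = cs.getD i ' ' then some i else none := by
        by_cases hc : c = cs.getD i ' '
        · rw [if_pos hc, List.find?_cons_of_pos (by rw [decide_eq_true_eq]; exact hc.symm)]
        · rw [if_neg hc,
            List.find?_cons_of_neg (by simp only [decide_eq_true_eq]; exact fun h => hc h.symm),
            List.find?_nil]
      by_cases hn : (last.get? (cs.getD i ' ')).isNone = true
      · rw [if_pos hn, PySem.Dict.get?_insert]
        by_cases hc : c = cs.getD i ' '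
        · subst hc
          rw [if_pos rfl, hsing, if_pos rfl]
          have hnone : List.find? (fun j => decide (cs.getD j ' ' = cs.getD i ' '))
              (List.range' (i + 1) (cs.length - (i + 1))).reverse = none := by
            rw [← hlast (cs.getD i ' ')]
            exact Option.isNone_iff_eq_none.mp hn
          rw [hnone]
          rfl
        · rw [if_neg hc, hsing, if_neg hc, hlast c, Option.or_none]
      · rw [if_neg hn]
        cases h' : last.get? (cs.getD i ' ') with
        | none => exact absurd (by rw [h']; rfl) hn
        | some w =>
          by_cases hc : c = cs.getD i ' '
          · subst hc
            rw [hsing, if_pos rfl, hlast (cs.getD i ' ')]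
            rw [hlast (cs.getD i ' ')] at h'
            rw [h']
            rfl
          · rw [hsing, if_neg hc, hlast c, Option.or_none]

-- the least occurrence recorded in first: its value is ≤ y iff v occurs in s[:y+1]
theorem first_le_iff (cs : List Char) (v : Char) (y : Nat) (hy : y + 1 < cs.length)
    (hv : cs.getD (y + 1) ' ' = v) :
    ((((List.range' 0 cs.length).find? (fun j => cs.getD j ' ' = v)).getD 0) ≤ y
      ↔ (cs.take (y + 1)).contains v = true) := by
  have hex : ∃ x ∈ List.range' 0 cs.length, decide (cs.getD x ' ' = v) = true :=
    ⟨y + 1, List.mem_range'_1.mpr ⟨by omega, by omega⟩, decide_eq_true hv⟩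
  obtain ⟨j0, hj0⟩ := Option.isSome_iff_exists.mp (List.find?_isSome.mpr hex)
  obtain ⟨hp0, i0, hi0, hei, hmin⟩ := List.find?_eq_some_iff_getElem.mp hj0
  have hgi : (List.range' 0 cs.length)[i0] = i0 := by simp
  rw [hgi] at hei
  subst hei
  rw [hj0]
  simp only [Option.getD_some]
  have hi0lt : i0 < cs.length := by simpa using hi0
  have hocc : cs.getD i0 ' ' = v := of_decide_eq_true hp0
  have hminP : ∀ b, b < i0 → cs.getD b ' ' ≠ v := by
    intro b hb hbe
    have hthis := hmin b hb
    simp only [List.getElem_range'] at hthis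
    rw [Bool.not_eq_true'] at hthis
    rw [show 0 + 1 * b = b by omega] at hthis
    exact of_decide_eq_false hthis hbe
  rw [take_contains_iff]
  constructor
  · intro hle
    exact ⟨i0, hle, hi0lt, hocc⟩
  · rintro ⟨b, hb, hblt, hbe⟩
    have : ¬ b < i0 := fun hbl => hminP b hbl hbe
    omega

-- the greatest occurrence recorded in last: e ≤ its value iff v occurs in s[e:]
theorem last_ge_iff (cs : List Char) (v : Char) (y : Nat) (hy : y + 1 < cs.length)
    (hv : cs.getD (y + 1) ' ' = v) (e : Nat) :
    (e ≤ (((List.range' 0 cs.length).reverse.find? (fun j => cs.getD j ' ' = v)).getD 0)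
      ↔ (cs.drop e).contains v = true) := by
  have hex : ∃ x ∈ (List.range' 0 cs.length).reverse, decide (cs.getD x ' ' = v) = true :=
    ⟨y + 1, List.mem_reverse.mpr (List.mem_range'_1.mpr ⟨by omega, by omega⟩),
      decide_eq_true hv⟩
  obtain ⟨jL, hjL⟩ := Option.isSome_iff_exists.mp (List.find?_isSome.mpr hex)
  obtain ⟨hpL, iL, hiL, hei, hmin⟩ := List.find?_eq_some_iff_getElem.mp hjL
  have hlen : (List.range' 0 cs.length).reverse.length = cs.length := by simp
  have hiL' : iL < cs.length := by rw [hlen] at hiL; exact hiL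
  have hgi : (List.range' 0 cs.length).reverse[iL] = cs.length - 1 - iL := by
    rw [List.getElem_reverse]
    simp
  rw [hgi] at hei
  rw [hjL]
  simp only [Option.getD_some]
  have hocc : cs.getD jL ' ' = v := of_decide_eq_true hpL
  have hjLlt : jL < cs.length := by omega
  have hminP : ∀ b, jL < b → b < cs.length → cs.getD b ' ' ≠ v := by
    intro b hb1 hb2 hbe
    have hthis := hmin (cs.length - 1 - b) (by omega)
    simp only [List.getElem_reverse, List.getElem_range', List.length_range'] at hthis
    rw [show 0 + 1 * (cs.length - 1 - (cs.length - 1 - b)) = b by omega] at hthis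
    rw [Bool.not_eq_true'] at hthis
    exact of_decide_eq_false hthis hbe
  rw [drop_contains_iff]
  constructor
  · intro hle
    exact ⟨jL, hle, hjLlt, hocc⟩
  · rintro ⟨b, hb, hblt, hbe⟩
    have : ¬ jL < b := fun hgt => hminP b hgt hblt hbe
    omega

-- e (as computed by B from the nxt table) equals A's scope endpoint
theorem bE_eq (cs : List Char) (nxt : PySem.Dict Nat Nat)
    (hnxt : ∀ p, p < cs.length → nxt.get? p = some (pvNext cs p)) (y : Nat)
    (hy : y + 1 < cs.length) :
    (if bSkip cs (y + 2) < cs.length then (nxt.get? (bSkip cs (y + 2))).getD cs.length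
     else cs.length) = aScope cs (aSkip cs (y + 2)) 0 := by
  have hle : bSkip cs (y + 2) ≤ cs.length := bSkip_le cs (y + 2) (by omega)
  rw [skip_eq]
  by_cases hq : bSkip cs (y + 2) < cs.length
  · rw [if_pos hq, hnxt _ hq]
    simp only [Option.getD_some]
    rw [aScope_char cs _ 0 (by omega), pvNext]
    congr 1
    apply find?_congr'
    intro m _
    apply decide_eq_decide.mpr
    omega
  · rw [if_neg hq]
    have hqe : bSkip cs (y + 2) = cs.length := by omega
    rw [hqe, aScope, dif_neg (lt_irrefl _)]

theorem bMain_iff (cs : List Char) (nxt : PySem.Dict Nat Nat)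
    (first last : PySem.Dict Char Nat) (x : Nat) :
    bMain cs nxt first last x = true ↔ ∀ y, x ≤ y → y + 1 < cs.length →
      (pvBadPair (cs.getD y ' ') (cs.getD (y + 1) ' ') = false ∧
       ((cs.getD y ' ' = '@' ∨ cs.getD y ' ' = '\\') →
         (¬ (first.get? (cs.getD (y + 1) ' ')).getD 0 ≤ y) ∧
         ¬ ((if bSkip cs (y + 2) < cs.length
               then (nxt.get? (bSkip cs (y + 2))).getD cs.length else cs.length)
             ≤ (last.get? (cs.getD (y + 1) ' ')).getD 0))) := by
  induction x using bMain.induct cs nxt first last with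
  | case1 x h h1 =>
    rw [bMain, dif_pos h, if_pos h1]
    refine iff_of_false (by decide) (fun hall => ?_)
    have hx := (hall x le_rfl (by omega)).1
    rw [pvBadPair] at hx
    rw [h1] at hx
    simp at hx
  | case2 x h h1 h2 =>
    rw [bMain, dif_pos h, if_neg h1, if_pos h2]
    refine iff_of_false (by decide) (fun hall => ?_)
    have hx := (hall x le_rfl (by omega)).1
    rw [pvBadPair] at hx
    rw [h2] at hx
    simp at hx
  | case3 x h h1 h2 h3 =>
    rw [bMain, dif_pos h, if_neg h1, if_neg h2, if_pos h3]
    refine iff_of_false (by decide) (fun hall => ?_)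
    have hx := (hall x le_rfl (by omega)).1
    rw [pvBadPair] at hx
    rw [h3] at hx
    simp at hx
  | case4 x h h1 h2 h3 h4 =>
    rw [bMain, dif_pos h, if_neg h1, if_neg h2, if_neg h3, if_pos h4]
    refine iff_of_false (by decide) (fun hall => ?_)
    have hx := (hall x le_rfl (by omega)).1
    rw [pvBadPair] at hx
    rw [h4] at hx
    simp at hx
  | case5 x h h1 h2 h3 h4 h5 h6 =>
    rw [bMain, dif_pos h, if_neg h1, if_neg h2, if_neg h3, if_neg h4, if_pos h5, if_pos h6]
    refine iff_of_false (by decide) (fun hall => ?_)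
    have hx := ((hall x le_rfl (by omega)).2 (by simpa using h5)).1
    exact hx h6
  | case6 x h h1 h2 h3 h4 h5 h6 h7 =>
    simp only [dite_eq_ite] at h7
    rw [bMain, dif_pos h, if_neg h1, if_neg h2, if_neg h3, if_neg h4, if_pos h5, if_neg h6,
      if_pos h7]
    refine iff_of_false (by decide) (fun hall => ?_)
    have hx := ((hall x le_rfl (by omega)).2 (by simpa using h5)).2
    exact hx h7
  | case7 x h h1 h2 h3 h4 h5 h6 h7 ih =>
    simp only [dite_eq_ite] at h7
    rw [bMain, dif_pos h, if_neg h1, if_neg h2, if_neg h3, if_neg h4, if_pos h5, if_neg h6,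
      if_neg h7, ih]
    refine step_iff x (fun _ => ⟨?_, fun _ => ⟨h6, h7⟩⟩)
    rw [pvBadPair]
    simp only [Bool.or_eq_false_iff]
    exact ⟨⟨⟨Bool.eq_false_iff.mpr h1, Bool.eq_false_iff.mpr h2⟩, Bool.eq_false_iff.mpr h3⟩,
      Bool.eq_false_iff.mpr h4⟩
  | case8 x h h1 h2 h3 h4 h5 ih =>
    rw [bMain, dif_pos h, if_neg h1, if_neg h2, if_neg h3, if_neg h4, if_neg h5, ih]
    refine step_iff x (fun _ => ⟨?_, fun hg => ?_⟩)
    · rw [pvBadPair]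
      simp only [Bool.or_eq_false_iff]
      exact ⟨⟨⟨Bool.eq_false_iff.mpr h1, Bool.eq_false_iff.mpr h2⟩, Bool.eq_false_iff.mpr h3⟩,
        Bool.eq_false_iff.mpr h4⟩
    · exfalso
      apply h5
      rcases hg with hg | hg <;> rw [hg] <;> simp
  | case9 x h =>
    rw [bMain, dif_neg h]
    simp only [true_iff]
    intro y hy hlt
    omega

theorem contains_paren_tilde (c : Char) :
    (['(', '~'].contains c) = (decide (c = '(') || decide (c = '~')) := by
  rw [Bool.eq_iff_iff]
  simp [List.contains_eq_mem]

theorem B_iff (input : String) :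
    inputChecker_alt input = true ↔
      (input.toList ≠ [] ∧ pvP1 input.toList ∧ pvFirstOk input.toList ∧
       pvLastOk input.toList ∧ pvPairsOk input.toList ∧ pvQB input.toList) := by
  rw [inputChecker_alt]
  set cs := input.toList with hcs
  by_cases h0 : cs.length = 0
  · rw [if_pos h0]
    refine iff_of_false (by decide) ?_
    rintro ⟨hne, -⟩
    exact hne (List.length_eq_zero_iff.mp h0)
  · rw [if_neg h0]
    have hne : cs ≠ [] := fun h => h0 (by rw [h]; rfl)
    -- the sweep's tables
    have hsweep := bSweep_spec cs cs.length 0 (PySem.Dict.empty.insert (0 : Int) cs.length)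
      PySem.Dict.empty PySem.Dict.empty PySem.Dict.empty le_rfl (by omega)
      (by
        intro t
        rw [PySem.Dict.get?_insert]
        have hr : cs.length + 1 - cs.length = 1 := by omega
        rw [hr, List.range'_one]
        by_cases ht : t = 0
        · rw [if_pos ht, List.find?_cons_of_pos (by rw [decide_eq_true_eq]; omega)]
        · rw [if_neg ht, List.find?_cons_of_neg (by simp only [decide_eq_true_eq]; omega),
            List.find?_nil, PySem.Dict.get?_empty])
      (by intro p hp1 hp2; omega)
      (by intro c; simp [PySem.Dict.get?_empty])
      (by intro c; simp [PySem.Dict.get?_empty])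
    obtain ⟨hd, hnxt, hfirst, hlast⟩ := hsweep
    have hD0 : pvD cs 0 = 0 := by simp [pvD]
    have hDn : pvD cs cs.length = (cs.count '(' : Int) - (cs.count ')' : Int) := by
      simp [pvD]
    by_cases h1 : pvP1 cs
    · rw [if_neg (by
        rw [hd, hD0, hDn]
        rw [pvP1] at h1
        omega)]
      by_cases h2 : (pvOperations.contains (cs.getD 0 ' ') || cs.getD 0 ' ' = ')') = true
      · rw [if_pos h2]
        refine iff_of_false (by decide) ?_
        rintro ⟨-, -, hf, -⟩
        rw [pvFirstOk] at hf
        rw [hf] at h2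
        exact absurd h2 (by decide)
      · rw [if_neg h2]
        by_cases h3 : (pvSpecial.contains (cs.getD (cs.length - 1) ' ')
            || ['(', '~'].contains (cs.getD (cs.length - 1) ' ')) = true
        · rw [if_pos h3]
          refine iff_of_false (by decide) ?_
          rintro ⟨-, -, -, hl, -⟩
          rw [pvLastOk] at hl
          rw [contains_paren_tilde, ← Bool.or_assoc] at h3
          rw [hl] at h3
          exact absurd h3 (by decide)
        · rw [if_neg h3]
          rw [bMain_iff]
          rw [contains_paren_tilde, ← Bool.or_assoc] at h3
          constructor
          · intro hm
            refine ⟨hne, h1, Bool.eq_false_iff.mpr h2, Bool.eq_false_iff.mpr h3, ?_, ?_⟩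
            · intro y hy
              exact (hm y (by omega) hy).1
            · intro y hy hg
              obtain ⟨hf, hl⟩ := (hm y (by omega) hy).2 hg
              constructor
              · by_contra hcc
                apply hf
                rw [hfirst]
                exact (first_le_iff cs _ y hy rfl).2 (bool_eq_true_of_ne_false hcc)
              · by_contra hcc
                apply hl
                rw [bE_eq cs _ hnxt y hy, hlast]
                exact (last_ge_iff cs _ y hy rfl _).2 (bool_eq_true_of_ne_false hcc)
          · rintro ⟨-, -, -, -, hp, hq⟩ y hy hlt
            refine ⟨hp y hlt, fun hg => ?_⟩
            obtain ⟨hq1, hq2⟩ := hq y hlt hg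
            constructor
            · intro hcc
              rw [hfirst] at hcc
              have := (first_le_iff cs _ y hlt rfl).1 hcc
              rw [hq1] at this
              exact absurd this (by decide)
            · intro hcc
              rw [bE_eq cs _ hnxt y hlt, hlast] at hcc
              have := (last_ge_iff cs _ y hlt rfl _).1 hcc
              rw [hq2] at this
              exact absurd this (by decide)
    · rw [if_pos (by
        rw [hd, hD0, hDn]
        rw [pvP1] at h1
        omega)]
      refine iff_of_false (by decide) ?_
      rintro ⟨-, hp1, -⟩
      exact h1 hp1

-- ===== VERDICT (by name: the statement is the Claim_ definition above) =====
theorem inputChecker_spec : Claim_equal_inputChecker := by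
  intro input _hdom hpre
  obtain ⟨hne, -⟩ := hpre
  unfold Spec_inputChecker
  rw [Bool.eq_iff_iff, A_iff input hne, B_iff input]
  constructor
  · rintro ⟨h1, h2, h3, h4, h5⟩
    exact ⟨hne, h1, h3, h2, h4, (qa_iff_qb input.toList h2).mp h5⟩
  · rintro ⟨-, h1, h3, h2, h4, h5⟩
    exact ⟨h1, h2, h3, h4, (qa_iff_qb input.toList h2).mpr h5⟩
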